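-- pv_equiv track=rewrite | github.com/Slothbetty/sabre | src/setup_real_trace.py | find_miss_segs
-- ===== SOURCE A (Python) =====
-- def find_miss_segs(all_dest_segs, num_segments):
--     """Return [s, s+1] from the longest run of non-destination segments."""
--     dest_set = set(all_dest_segs)
--     best_start, best_len = None, 0
--     run_start, run_len = None, 0
--     for seg in range(num_segments):
--         if seg not in dest_set:
--             if run_start is None:
--                 run_start = seg
--             run_len += 1
--         else:
--             if run_len > best_len:
--                 best_len, best_start = run_len, run_start
--             run_start, run_len = None, 0
--     if run_len > best_len:
--         best_len, best_start = run_len, run_start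
--
--     if best_start is None or best_len < 2:
--         raise ValueError("Cannot find 2 consecutive non-destination segments")
--
--     mid = best_start + (best_len - 2) // 2
--     return [mid, mid + 1]
-- ===== SOURCE B (Python) =====
-- def find_miss_segs(all_dest_segs, num_segments):
--     """Return [s, s+1] from the longest run of non-destination segments."""
--     pos = sorted({p for p in all_dest_segs if 0 <= p < num_segments})
--     pts = [-1] + pos + [num_segments]
--     best_start, best_len = 0, 0
--     for cur, nxt in zip(pts, pts[1:]):
--         gap = nxt - cur - 1
--         if gap > best_len:
--             best_len, best_start = gap, cur + 1
--     if best_len < 2: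
--         raise ValueError("Cannot find 2 consecutive non-destination segments")
--     mid = best_start + (best_len - 2) // 2
--     return [mid, mid + 1]
-- ===== Notes on version B (the rewrite author's own statement) =====
-- stated objective: faster
-- what changed: Instead of scanning every segment index in range(num_segments) with run-tracking state, B sorts the deduplicated in-range destination positions, frames them with sentinels -1 and num_segments, and reads each maximal missing run off a consecutive gap, keeping the first maximal gap.
import Mathlib
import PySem

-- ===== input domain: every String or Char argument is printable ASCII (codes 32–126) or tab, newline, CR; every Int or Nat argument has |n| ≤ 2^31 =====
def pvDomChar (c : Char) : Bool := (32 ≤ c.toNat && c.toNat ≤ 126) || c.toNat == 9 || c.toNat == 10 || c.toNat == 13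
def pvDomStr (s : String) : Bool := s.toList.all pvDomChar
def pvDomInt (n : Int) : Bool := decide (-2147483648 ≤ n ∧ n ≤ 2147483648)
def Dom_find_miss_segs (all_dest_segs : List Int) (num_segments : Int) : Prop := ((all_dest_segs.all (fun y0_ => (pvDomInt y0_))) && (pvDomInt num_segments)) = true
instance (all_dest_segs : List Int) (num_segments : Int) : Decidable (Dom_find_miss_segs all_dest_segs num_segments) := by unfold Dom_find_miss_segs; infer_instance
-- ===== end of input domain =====

-- B replaces A's scan over every segment index by a scan over the sorted in-range destination
-- positions (sentinel-framed), reading each maximal missing run off a consecutive gap (measured faster).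
-- Both Pythons raise ValueError when no 2 consecutive missing segments exist; Pre_ excludes exactly that.

-- ===== PORT A =====
-- loop body of A: state = (best_start, best_len, run_start, run_len)
def pvStepA (d : Int → Bool) (s : Option Int × Int × Option Int × Int) (seg : Int) :
    Option Int × Int × Option Int × Int :=
  if !(d seg) then
    (s.1, s.2.1, (match s.2.2.1 with | none => some seg | some r => some r), s.2.2.2 + 1)
  else
    if s.2.2.2 > s.2.1 then (s.2.2.1, s.2.2.2, none, 0) else (s.1, s.2.1, none, 0)

def find_miss_segs (all_dest_segs : List Int) (num_segments : Int) : List Int :=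
  let dest_set : PySem.Set Int := PySem.Set.ofList all_dest_segs
  let st := (PySem.List.pyRange 0 num_segments 1).foldl
              (pvStepA (fun x => PySem.Set.contains dest_set x)) (none, 0, none, 0)
  let bb := if st.2.2.2 > st.2.1 then (st.2.2.1, st.2.2.2) else (st.1, st.2.1)
  match bb.1 with
  | none => []   -- ValueError in Python (excluded by Pre_)
  | some bs =>
    if bb.2 < 2 then []   -- ValueError in Python (excluded by Pre_)
    else [bs + PySem.Int.floordiv (bb.2 - 2) 2, bs + PySem.Int.floordiv (bb.2 - 2) 2 + 1]

-- ===== PORT B =====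
-- loop body of B: state = (best_start, best_len), pr = (cur, nxt), gap = nxt - cur - 1
def pvStepB (s : Int × Int) (pr : Int × Int) : Int × Int :=
  if pr.2 - pr.1 - 1 > s.2 then (pr.1 + 1, pr.2 - pr.1 - 1) else s

def find_miss_segs_alt (all_dest_segs : List Int) (num_segments : Int) : List Int :=
  let pos := PySem.List.sorted
      (PySem.Set.ofList (all_dest_segs.filter (fun p => decide (0 ≤ p) && decide (p < num_segments))))
      (fun x => x) false
  let pts := -1 :: (pos ++ [num_segments])
  let st := (pts.zip pts.tail).foldl pvStepB (0, 0)
  if st.2 < 2 then []   -- ValueError in Python (excluded by Pre_)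
  else [st.1 + PySem.Int.floordiv (st.2 - 2) 2, st.1 + PySem.Int.floordiv (st.2 - 2) 2 + 1]

-- ===== PRECONDITION & SPEC =====
-- Pre_ excludes exactly the inputs on which A (and B) raise ValueError: those with no two
-- consecutive segment indices in [0, num_segments) both outside all_dest_segs.  (Such a pair
-- exists iff one starts at 0 or right after some listed destination value.)
def pvFreePairAt (all_dest_segs : List Int) (num_segments s : Int) : Bool :=
  decide (0 ≤ s) && decide (s + 1 < num_segments) &&
  !(all_dest_segs.contains s) && !(all_dest_segs.contains (s + 1))

def Pre_find_miss_segs (all_dest_segs : List Int) (num_segments : Int) : Prop :=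
  (pvFreePairAt all_dest_segs num_segments 0
    || all_dest_segs.any (fun p => pvFreePairAt all_dest_segs num_segments (p + 1))) = true
instance (all_dest_segs : List Int) (num_segments : Int) : Decidable (Pre_find_miss_segs all_dest_segs num_segments) := by unfold Pre_find_miss_segs; infer_instance

def pvWitness_find_miss_segs : List Int × Int := ([0, 3], 7)

def Spec_find_miss_segs (all_dest_segs : List Int) (num_segments : Int) (out : List Int) : Prop := out = find_miss_segs_alt all_dest_segs num_segments
instance (all_dest_segs : List Int) (num_segments : Int) (out : List Int) : Decidable (Spec_find_miss_segs all_dest_segs num_segments out) := by unfold Spec_find_miss_segs; infer_instance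

-- ===== CLAIM (what is proved, stated in full; the proofs are below) =====
def Claim_equal_find_miss_segs : Prop := ∀ (all_dest_segs : List Int) (num_segments : Int), Dom_find_miss_segs all_dest_segs num_segments → Pre_find_miss_segs all_dest_segs num_segments → Spec_find_miss_segs all_dest_segs num_segments (find_miss_segs all_dest_segs num_segments)

-- ===== LEMMAS AND PROOFS =====

-- B's zip-with-tail fold, rephrased as a structural recursion over the interior points
def pvPairsFold : Int → List Int → Int → (Int × Int) → (Int × Int)
  | prev, [], n, s => pvStepB s (prev, n)
  | prev, p :: ps, n, s => pvPairsFold p ps n (pvStepB s (prev, p))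

theorem pvZipFold (ps : List Int) : ∀ (prev n : Int) (s : Int × Int),
    (((prev :: (ps ++ [n])).zip (ps ++ [n])).foldl pvStepB s) = pvPairsFold prev ps n s := by
  induction ps with
  | nil => intro prev n s; simp [pvPairsFold, List.zip]
  | cons p t ih => intro prev n s; simp only [List.cons_append, List.zip_cons_cons, List.foldl_cons]
                   exact ih p n (pvStepB s (prev, p))

theorem pvRunLemma (d : Int → Bool) (k : Nat) : ∀ (a : Int) (bs : Option Int) (bl : Int)
    (rs : Option Int) (rl : Int), (∀ x, a ≤ x → x < a + k → d x = false) →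
    (PySem.List.pyRange a (a + k) 1).foldl (pvStepA d) (bs, bl, rs, rl)
      = (bs, bl, (match rs with
                  | some r => some r
                  | none => if k = 0 then none else some a), rl + (k : Int)) := by
  induction k with
  | zero =>
      intro a bs bl rs rl _
      rw [PySem.List.pyRange_one_eq_nil (by omega)]
      cases rs <;> simp
  | succ m ih =>
      intro a bs bl rs rl h
      rw [PySem.List.pyRange_one_cons (by push_cast; omega)]
      simp only [List.foldl_cons]
      have hda : d a = false := h a (le_refl a) (by push_cast; omega)
      rw [show (a : Int) + ((m + 1 : Nat) : Int) = (a + 1) + (m : Int) by push_cast; ring]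
      rw [show pvStepA d (bs, bl, rs, rl) a
            = (bs, bl, (match rs with | none => some a | some r => some r), rl + 1) by
          simp [pvStepA, hda]]
      rw [ih (a + 1) bs bl _ (rl + 1) (by intro x h1 h2'; exact h x (by omega) (by push_cast at h2' ⊢; omega))]
      cases rs <;> simp [Prod.ext_iff] <;> omega

theorem pvMain (d : Int → Bool) (ps : List Int) : ∀ (a n : Int) (bs : Option Int) (bl s1 s2 : Int),
    ps.Pairwise (· < ·) →
    (∀ x, x ∈ ps ↔ (a ≤ x ∧ x < n ∧ d x = true)) →
    bl = s2 → 0 ≤ bl → (1 ≤ bl → bs = some s1) →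
    (let st := (PySem.List.pyRange a n 1).foldl (pvStepA d) (bs, bl, none, 0)
     let bb := if st.2.2.2 > st.2.1 then (st.2.2.1, st.2.2.2) else (st.1, st.2.1)
     let sb := pvPairsFold (a - 1) ps n (s1, s2)
     bb.2 = sb.2 ∧ 0 ≤ bb.2 ∧ (1 ≤ bb.2 → bb.1 = some sb.1)) := by
  induction ps with
  | nil =>
      intro a n bs bl s1 s2 _ hmem hbl hnn hsome
      simp only [pvPairsFold]
      by_cases han : a < n
      · have hnd : ∀ x, a ≤ x → x < a + ((n - a).toNat : Int) → d x = false := by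
          intro x h1 h2
          by_contra hc
          have := (hmem x).mpr ⟨h1, by omega, by revert hc; cases d x <;> simp⟩
          simp at this
        have heq : n = a + ((n - a).toNat : Int) := by omega
        rw [heq, pvRunLemma d (n - a).toNat a bs bl none 0 hnd]
        have hk : (n - a).toNat ≠ 0 := by omega
        simp only [hk, if_false, pvStepB]
        rw [← heq]
        rw [show n - (a - 1) - 1 = n - a by ring, show a - 1 + 1 = a by ring]
        by_cases hc : n - a > s2
        · rw [if_pos (by omega : (0 : Int) + ((n-a).toNat : Int) > bl),
              if_pos (by simpa using hc)]
          refine ⟨by omega, by omega, fun _ => rfl⟩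
        · rw [if_neg (by omega : ¬ ((0 : Int) + ((n-a).toNat : Int) > bl)),
              if_neg (by simpa using hc)]
          exact ⟨hbl, hnn, hsome⟩
      · rw [PySem.List.pyRange_one_eq_nil (by omega)]
        simp only [List.foldl_nil, pvStepB]
        rw [if_neg (by omega : ¬ ((0:Int) > bl)), if_neg (by omega : ¬ (n - (a-1) - 1 > s2))]
        exact ⟨hbl, hnn, hsome⟩
  | cons p t ih =>
      intro a n bs bl s1 s2 hpw hmem hbl hnn hsome
      have hp := (hmem p).mp (List.mem_cons_self)
      obtain ⟨hap, hpn, hdp⟩ := hp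
      have hpw' := (List.pairwise_cons.mp hpw)
      -- split the range at p and p+1
      rw [PySem.List.pyRange_one_append a p n hap (by omega),
          PySem.List.pyRange_one_cons hpn, List.foldl_append, List.foldl_cons]
      have hnd : ∀ x, a ≤ x → x < a + ((p - a).toNat : Int) → d x = false := by
        intro x h1 h2
        have hxp : x < p := by omega
        by_contra hc
        have hx : x ∈ p :: t := (hmem x).mpr ⟨h1, by omega, by revert hc; cases d x <;> simp⟩
        rcases List.mem_cons.mp hx with rfl | hxt
        · omega
        · exact absurd (hpw'.1 x hxt) (by omega)
      have heq : p = a + ((p - a).toNat : Int) := by omega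
      rw [heq, pvRunLemma d (p - a).toNat a bs bl none 0 hnd, ← heq]
      -- the dest step at p
      rw [show pvStepA d (bs, bl,
            (match (none : Option Int) with
             | some r => some r
             | none => if (p - a).toNat = 0 then none else some a),
            0 + ((p - a).toNat : Int)) p
          = (if (0 : Int) + ((p - a).toNat : Int) > bl
             then ((if (p - a).toNat = 0 then none else some a), (0 : Int) + ((p - a).toNat : Int), none, (0:Int))
             else (bs, bl, none, (0:Int))) by
        simp [pvStepA, hdp]]
      simp only [pvPairsFold]
      have hstep : pvStepB (s1, s2) (a - 1, p)
          = if p - a > s2 then (a, p - a) else (s1, s2) := by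
        simp only [pvStepB]
        rw [show p - (a - 1) - 1 = p - a by ring, show a - 1 + 1 = a by ring]
      rw [hstep]
      rw [show (0:Int) + ((p - a).toNat : Int) = p - a by omega]
      by_cases hc : p - a > bl
      · rw [if_pos (show p - a > bl from hc), if_pos (show p - a > s2 by omega)]
        have hk0 : (p - a).toNat ≠ 0 := by omega
        simp only [hk0, if_false]
        have := ih (p + 1) n (some a) (p - a) a (p - a)
          hpw'.2
          (by intro x
              constructor
              · intro hx
                have := (hmem x).mp (List.mem_cons_of_mem p hx)
                exact ⟨by have := hpw'.1 x hx; omega, this.2.1, this.2.2⟩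
              · rintro ⟨h1, h2, h3⟩
                have hx : x ∈ p :: t := (hmem x).mpr ⟨by omega, h2, h3⟩
                rcases List.mem_cons.mp hx with rfl | hxt
                · omega
                · exact hxt)
          rfl (by omega) (fun _ => rfl)
        simpa only [show (p:Int) + 1 - 1 = p by ring] using this
      · rw [if_neg (show ¬ (p - a > bl) from hc), if_neg (show ¬ (p - a > s2) by omega)]
        have := ih (p + 1) n bs bl s1 s2
          hpw'.2
          (by intro x
              constructor
              · intro hx
                have := (hmem x).mp (List.mem_cons_of_mem p hx)
                exact ⟨by have := hpw'.1 x hx; omega, this.2.1, this.2.2⟩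
              · rintro ⟨h1, h2, h3⟩
                have hx : x ∈ p :: t := (hmem x).mpr ⟨by omega, h2, h3⟩
                rcases List.mem_cons.mp hx with rfl | hxt
                · omega
                · exact hxt)
          hbl hnn hsome
        simpa only [show (p:Int) + 1 - 1 = p by ring] using this

-- ===== VERDICT (by name: the statement is the Claim_ definition above) =====
theorem find_miss_segs_spec : Claim_equal_find_miss_segs := by
  intro l n _ _
  unfold Spec_find_miss_segs find_miss_segs find_miss_segs_alt
  simp only []
  set d : Int → Bool := fun x => PySem.Set.contains (PySem.Set.ofList l) x with hd
  set pos := PySem.List.sorted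
      (PySem.Set.ofList (l.filter (fun p => decide (0 ≤ p) && decide (p < n))))
      (fun x => x) false with hpos
  have hpw : pos.Pairwise (· < ·) := by
    rw [hpos]; exact PySem.List.sorted_ofList_pairwise_lt _
  have hmem : ∀ x, x ∈ pos ↔ (0 ≤ x ∧ x < n ∧ d x = true) := by
    intro x
    rw [hpos, PySem.List.mem_sorted, PySem.Set.mem_ofList, List.mem_filter]
    simp [hd, PySem.Set.contains, PySem.Set.mem_ofList]
    tauto
  have hmain := pvMain d pos 0 n none 0 0 0 hpw (by simpa using hmem) rfl le_rfl
    (by intro h; omega)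
  simp only [show (0 : Int) - 1 = -1 by ring] at hmain
  rw [List.tail_cons, pvZipFold pos (-1) n (0, 0)]
  set st := (PySem.List.pyRange 0 n 1).foldl (pvStepA d) (none, 0, none, 0) with hst
  set bb := if st.2.2.2 > st.2.1 then (st.2.2.1, st.2.2.2) else (st.1, st.2.1) with hbb
  set sb := pvPairsFold (-1) pos n (0, 0) with hsb
  obtain ⟨h1, h2, h3⟩ := hmain
  by_cases hlt : sb.2 < 2
  · rw [if_pos hlt]
    rcases hbs : bb.1 with _ | bs
    · rfl
    · exact if_pos (show bb.2 < 2 by omega)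
  · rw [if_neg hlt]
    have hbs := h3 (by omega)
    rw [hbs, h1]
    exact if_neg hlt
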